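-- pv_equiv track=rewrite | github.com/nguyenvantu11052002/Python-PTIT | PY01029 - SỐ ĐẢO NGUYÊN TỐ CÙNG NHAU.py | check
-- ===== SOURCE A (Python) =====
-- import math
--
-- def check (n) :
--     x = n
--     m = 0
--     while n != 0:
--         m = m * 10 + n % 10
--         n = int(n/10)
--     if math.gcd(m, x) == 1 :
--         return True
--     return False
-- ===== SOURCE B (Python) =====
-- import math
--
-- def check(n):
--     # Scan the decimal string left to right, adding each digit at a growing
--     # place value: after the scan m is the digit-reversal of n.
--     m = 0
--     p = 1
--     for ch in str(n):
--         m += int(ch) * p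
--         p *= 10
--     return math.gcd(m, n) == 1
-- ===== Notes on version B (the rewrite author's own statement) =====
-- stated objective: alternative
-- what changed: B replaces A's arithmetic while-loop (Horner accumulator that peels off the last decimal digit each iteration) by a single left-to-right scan of str(n) that adds each digit at a growing place value, then does the same gcd coprimality test. Pre_ excludes negative n, where A's loop (floor-mod combined with truncating division) returns an accidental value while B raises ValueError parsing the minus sign.
-- outside the precondition, e.g. on check(-12): A returns True, B raises ValueError; on check(-7): A returns True, B raises ValueError
import Mathlib
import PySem

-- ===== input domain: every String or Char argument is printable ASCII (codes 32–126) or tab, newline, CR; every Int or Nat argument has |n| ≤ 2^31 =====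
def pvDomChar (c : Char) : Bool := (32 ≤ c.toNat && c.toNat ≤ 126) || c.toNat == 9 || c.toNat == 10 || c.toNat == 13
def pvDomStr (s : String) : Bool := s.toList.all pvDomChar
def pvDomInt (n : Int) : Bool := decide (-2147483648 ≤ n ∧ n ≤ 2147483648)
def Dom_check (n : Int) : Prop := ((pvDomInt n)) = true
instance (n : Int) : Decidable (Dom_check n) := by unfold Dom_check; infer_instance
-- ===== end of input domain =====

-- B reverses the number by scanning str(n) with positional weights instead of A's
-- arithmetic digit loop (objective: alternative decomposition, same cost).

-- ===== PORT A =====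
-- termination helper for the while loop: int(n/10) strictly shrinks |n|
theorem pvTruncdivTenLt (n : Int) (h : n ≠ 0) :
    (PySem.Int.truncdiv n 10).natAbs < n.natAbs := by
  cases n with
  | ofNat m =>
    cases m with
    | zero => exact absurd rfl h
    | succ k =>
      show ((Int.ofNat (k+1)).tdiv 10).natAbs < k + 1
      simp [Int.tdiv]
      omega
  | negSucc m =>
    show ((Int.negSucc m).tdiv 10).natAbs < m + 1
    simp [Int.tdiv]
    omega

-- while n != 0: m = m*10 + n % 10; n = int(n/10)
def checkLoop (m n : Int) : Int :=
  if n ≠ 0 then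
    checkLoop (m * 10 + PySem.Int.mod n 10) (PySem.Int.truncdiv n 10)
  else m
termination_by n.natAbs
decreasing_by exact pvTruncdivTenLt n (by assumption)

def check (n : Int) : Bool :=
  let x := n
  let m := checkLoop 0 n
  if Int.gcd m x = 1 then true else false

-- ===== PORT B =====
-- int(ch) for one character of str(n); the ValueError case ('-' of a negative n)
-- is outside Pre_check, the port totalises it with 0
def chDigit (c : Char) : Int := (PySem.Int.ofStr? (String.singleton c)).getD 0

-- loop body: m += int(ch) * p; p *= 10   (state = (m, p))
def stepB (mp : Int × Int) (c : Char) : Int × Int :=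
  (mp.1 + chDigit c * mp.2, mp.2 * 10)

def check_alt (n : Int) : Bool :=
  let m := ((PySem.Int.toStr n).toList.foldl stepB (0, 1)).1
  decide (Int.gcd m n = 1)

-- ===== PRECONDITION & SPEC =====
-- Pre_ excludes negative n, where A's loop (floor-mod with truncating division)
-- returns an accidental value while B raises ValueError parsing the '-' character.
def Pre_check (n : Int) : Prop := 0 ≤ n
instance (n : Int) : Decidable (Pre_check n) := by unfold Pre_check; infer_instance

def pvWitness_check : Int := 12

def Spec_check (n : Int) (out : Bool) : Prop := out = check_alt n
instance (n : Int) (out : Bool) : Decidable (Spec_check n out) := by unfold Spec_check; infer_instance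

-- ===== CLAIM (what is proved, stated in full; the proofs are below) =====
def Claim_equal_check : Prop := ∀ (n : Int), Dom_check n → Pre_check n → Spec_check n (check n)

-- ===== LEMMAS AND PROOFS =====

-- little-endian value of a digit list (Horner, least significant first)
def natPoly : List Nat → Nat
  | [] => 0
  | d :: ds => d + 10 * natPoly ds

-- little-endian value of a character list through chDigit
def polyVal : List Char → Int
  | [] => 0
  | c :: cs => chDigit c + 10 * polyVal cs

theorem natPoly_append_singleton (xs : List Nat) (d : Nat) :
    natPoly (xs ++ [d]) = natPoly xs + d * 10 ^ xs.length := by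
  induction xs with
  | nil => simp [natPoly]
  | cons x xs ih => simp [natPoly, ih]; ring

theorem truncdiv_natCast (a b : Nat) :
    PySem.Int.truncdiv (a : Int) (b : Int) = ((a / b : Nat) : Int) := rfl

-- A's loop on a nonnegative n computes the digit reversal (with accumulator)
theorem checkLoop_natCast (k acc : Nat) :
    checkLoop (acc : Int) (k : Int) =
      ((acc * 10 ^ (Nat.digits 10 k).length + natPoly (Nat.digits 10 k).reverse : Nat) : Int) := by
  induction k using Nat.strong_induction_on generalizing acc with
  | _ k ih =>
    rw [checkLoop]
    by_cases hk : k = 0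
    · subst hk; simp [natPoly]
    · have hk' : (k : Int) ≠ 0 := by exact_mod_cast hk
      rw [if_pos hk']
      have hmod := PySem.Int.mod_natCast k 10
      have hdiv := truncdiv_natCast k 10
      simp only [Nat.cast_ofNat] at hmod hdiv
      rw [hmod, hdiv]
      have : (acc : Int) * 10 + ((k % 10 : Nat) : Int) = ((acc * 10 + k % 10 : Nat) : Int) := by
        push_cast; ring
      rw [this, ih (k / 10) (Nat.div_lt_self (Nat.pos_of_ne_zero hk) (by norm_num)) _]
      rw [Nat.digits_def' (by norm_num : (1:Nat) < 10) (Nat.pos_of_ne_zero hk)]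
      simp [natPoly_append_singleton]
      ring

-- B's fold with positional weights
theorem foldl_stepB (L : List Char) (m p : Int) :
    L.foldl stepB (m, p) = (m + polyVal L * p, p * 10 ^ L.length) := by
  induction L generalizing m p with
  | nil => simp [polyVal]
  | cons c cs ih =>
    simp only [List.foldl_cons, stepB, ih, polyVal, List.length_cons]
    rw [Prod.mk.injEq]
    exact ⟨by ring, by ring⟩

-- int(ch) of a decimal digit character
theorem chDigit_digitChar (d : Nat) (hd : d < 10) :
    chDigit (Nat.digitChar d) = (d : Int) := by
  interval_cases d <;> decide

theorem polyVal_map_digitChar (ds : List Nat) (h : ∀ d ∈ ds, d < 10) :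
    polyVal (ds.map Nat.digitChar) = ((natPoly ds : Nat) : Int) := by
  induction ds with
  | nil => simp [polyVal, natPoly]
  | cons d ds ih =>
    simp only [List.map_cons, polyVal, natPoly]
    rw [chDigit_digitChar d (h d (by simp)), ih (fun x hx => h x (by simp [hx]))]
    push_cast; ring

-- Nat.toDigitsCore is the reversed digit list (enough fuel, positive n)
theorem toDigitsCore_eq (fuel : Nat) :
    ∀ (n : Nat) (ds : List Char), 0 < n → n ≤ fuel →
      Nat.toDigitsCore 10 fuel n ds = ((Nat.digits 10 n).map Nat.digitChar).reverse ++ ds := by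
  induction fuel with
  | zero => intro n ds hn hf; omega
  | succ fuel ih =>
    intro n ds hn hf
    rw [Nat.toDigitsCore]
    rw [Nat.digits_def' (by norm_num : (1:Nat) < 10) hn]
    by_cases h10 : n / 10 = 0
    · rw [if_pos h10, h10]
      simp
    · rw [if_neg h10]
      rw [ih (n / 10) _ (Nat.pos_of_ne_zero h10)
        (by have := Nat.div_lt_self hn (by norm_num : (1:Nat) < 10); omega)]
      simp [List.append_assoc]

theorem toDigits_eq (k : Nat) :
    Nat.toDigits 10 k =
      if k = 0 then ['0'] else ((Nat.digits 10 k).map Nat.digitChar).reverse := by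
  by_cases hk : k = 0
  · subst hk; simp [Nat.toDigits]; rfl
  · rw [if_neg hk]
    unfold Nat.toDigits
    rw [toDigitsCore_eq (k + 1) k [] (Nat.pos_of_ne_zero hk) (by omega)]
    simp

theorem toChars_natCast (k : Nat) :
    PySem.Int.toChars (k : Int) = Nat.toDigits 10 k := by
  simp [PySem.Int.toChars]

-- ===== VERDICT (by name: the statement is the Claim_ definition above) =====
theorem check_spec : Claim_equal_check := by
  intro n _ hpre
  unfold Spec_check
  lift n to Nat using hpre with k
  unfold check check_alt
  have hA : checkLoop 0 (k : Int) = ((natPoly (Nat.digits 10 k).reverse : Nat) : Int) := by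
    have := checkLoop_natCast k 0
    simpa using this
  have hchars : (PySem.Int.toStr (k : Int)).toList = Nat.toDigits 10 k := by
    rw [PySem.Int.toList_toStr, toChars_natCast]
  have hB : (((PySem.Int.toStr (k : Int)).toList.foldl stepB (0, 1)).1 : Int)
      = ((natPoly (Nat.digits 10 k).reverse : Nat) : Int) := by
    rw [hchars, toDigits_eq]
    by_cases hk : k = 0
    · subst hk
      simp [natPoly]
      decide
    · rw [if_neg hk, foldl_stepB]
      simp only
      rw [← List.map_reverse, polyVal_map_digitChar _
        (fun d hd => Nat.digits_lt_base (by norm_num) (List.mem_reverse.mp hd))]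
      ring
  simp only [hA, hB]
  split <;> simp_all
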